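-- pv_equiv track=rewrite | github.com/gpauloski/kfac-pytorch | kfac/assignment.py | partition_grad_workers
-- ===== SOURCE A (Python) =====
-- def partition_grad_workers(
--     world_size: int,
--     grad_workers: int,
-- ) -> set[frozenset[int]]:
--     """Returns set of sets of unique gradient workers.
--
--     Constructs an m x n grid of the ranks in the world where m=grad_workers
--     and and n=world_size/grad_workers with ranks ordered in ascending
--     order left-to-right, top-to-bottom. The gradient worker groups are the
--     columns of this grid.
--
--     Example:
--         input: world_size = 8, grad_workers = 2
--
--         |          grad_worker groups           |
--         | group 1 | group 2 | group 3 | group 4 |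
--         | ------- | ------- | ------- | ------- |
--         |    0    |    1    |    2    |    3    | <- grad receiver group 1
--         |    4    |    5    |    6    |    7    | <- grad receiver group 2
--
--         output: [[0, 4], [1, 5], [2, 6], [3, 7]]
--
--     Args:
--         world_size (int): world size.
--         grad_workers (int): number of gradient workers.
--
--     Returns:
--         set[set[int]] where the total number of elements is equal to
--         world_size and the size of each subset is equal to grad_workers.
--     """
--     if not 0 < world_size:
--         raise ValueError('world_size must be > 0')
--     if world_size % grad_workers != 0:
--         raise ValueError(
--             'world_size must be an integer multiple of the gradient '
--             'worker count',
--         )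
--     partitions = world_size // grad_workers
--     return {
--         frozenset(range(i, world_size, partitions))
--         for i in range(partitions)
--     }
-- ===== SOURCE B (Python) =====
-- def partition_grad_workers(
--     world_size: int,
--     grad_workers: int,
-- ) -> set[frozenset[int]]:
--     """Build the m x n grid of ranks row-major, then transpose it: the
--     gradient worker groups are the columns of the grid."""
--     if not 0 < world_size:
--         raise ValueError('world_size must be > 0')
--     if world_size % grad_workers != 0:
--         raise ValueError(
--             'world_size must be an integer multiple of the gradient '
--             'worker count',
--         )
--     partitions = world_size // grad_workers
--     rows = [
--         list(range(r * partitions, r * partitions + partitions))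
--         for r in range(grad_workers)
--     ]
--     return {frozenset(col) for col in zip(*rows)}
-- ===== Notes on version B (the rewrite author's own statement) =====
-- stated objective: alternative
-- what changed: Instead of computing each column directly with a strided range(i, world_size, partitions), B materialises the m x n grid row-major with unit-step ranges and transposes it via zip(*rows) to obtain the columns.
import Mathlib
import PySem

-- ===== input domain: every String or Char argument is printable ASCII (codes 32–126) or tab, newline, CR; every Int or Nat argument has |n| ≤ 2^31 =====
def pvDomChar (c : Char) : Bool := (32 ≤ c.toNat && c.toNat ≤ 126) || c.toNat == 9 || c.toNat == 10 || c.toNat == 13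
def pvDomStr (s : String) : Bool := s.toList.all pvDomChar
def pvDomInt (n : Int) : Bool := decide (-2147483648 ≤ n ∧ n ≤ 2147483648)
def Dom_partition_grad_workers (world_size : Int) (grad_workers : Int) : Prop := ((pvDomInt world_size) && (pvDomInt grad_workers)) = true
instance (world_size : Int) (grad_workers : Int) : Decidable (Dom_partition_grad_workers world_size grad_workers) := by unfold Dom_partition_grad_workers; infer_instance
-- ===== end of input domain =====

-- B builds the m×n rank grid row-major and transposes it (zip(*rows)) instead of
-- computing each column by a strided range; alternative decomposition, same cost.


-- ===== PORT A =====
-- {frozenset(range(i, world_size, partitions)) for i in range(partitions)}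
def partition_grad_workers (world_size : Int) (grad_workers : Int) : List (List Int) :=
  let partitions := PySem.Int.floordiv world_size grad_workers
  PySem.Set.ofList
    ((PySem.List.pyRange 0 partitions 1).map
      (fun i => PySem.Set.ofList (PySem.List.pyRange i world_size partitions)))

-- ===== PORT B =====
-- hand port of zip(*rows): output length is the minimum row length, column j holds the
-- j-th element of every row (exact: every used index j is below every row's length)
def pvZipStar (rows : List (List Int)) : List (List Int) :=
  match rows with
  | [] => []
  | r0 :: rest =>
    (List.range (rest.foldl (fun m r => min m r.length) r0.length)).map
      (fun j => (r0 :: rest).map (fun r => r.getD j 0))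

def partition_grad_workers_alt (world_size : Int) (grad_workers : Int) : List (List Int) :=
  let partitions := PySem.Int.floordiv world_size grad_workers
  let rows := (PySem.List.pyRange 0 grad_workers 1).map
    (fun r => PySem.List.pyRange (r * partitions) (r * partitions + partitions) 1)
  PySem.Set.ofList ((pvZipStar rows).map (fun col => PySem.Set.ofList col))

-- ===== PRECONDITION & SPEC =====
-- A raises ValueError when world_size ≤ 0 or world_size % grad_workers ≠ 0, and
-- ZeroDivisionError when grad_workers = 0: exactly those inputs are excluded.
def Pre_partition_grad_workers (world_size : Int) (grad_workers : Int) : Prop :=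
  0 < world_size ∧ grad_workers ≠ 0 ∧ PySem.Int.mod world_size grad_workers = 0
instance (world_size : Int) (grad_workers : Int) : Decidable (Pre_partition_grad_workers world_size grad_workers) := by unfold Pre_partition_grad_workers; infer_instance
def pvWitness_partition_grad_workers : Int × Int := (8, 2)
def Spec_partition_grad_workers (world_size : Int) (grad_workers : Int) (out : List (List Int)) : Prop := out = partition_grad_workers_alt world_size grad_workers
instance (world_size : Int) (grad_workers : Int) (out : List (List Int)) : Decidable (Spec_partition_grad_workers world_size grad_workers out) := by unfold Spec_partition_grad_workers; infer_instance

-- ===== CLAIM (what is proved, stated in full; the proofs are below) =====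
def Claim_equal_partition_grad_workers : Prop := ∀ (world_size : Int) (grad_workers : Int), Dom_partition_grad_workers world_size grad_workers → Pre_partition_grad_workers world_size grad_workers → Spec_partition_grad_workers world_size grad_workers (partition_grad_workers world_size grad_workers)

-- ===== LEMMAS AND PROOFS =====

theorem pv_foldl_min_const (rs : List (List Int)) (n : Nat)
    (h : ∀ r ∈ rs, r.length = n) :
    rs.foldl (fun m r => min m r.length) n = n := by
  induction rs with
  | nil => rfl
  | cons r t ih =>
    have hr : r.length = n := h r (by simp)
    simp only [List.foldl_cons, hr, min_self]
    exact ih (fun x hx => h x (by simp [hx]))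

theorem pvZipStar_const_len (rows : List (List Int)) (n : Nat)
    (hne : rows ≠ []) (hlen : ∀ r ∈ rows, r.length = n) :
    pvZipStar rows =
      (List.range n).map (fun j => rows.map (fun r => r.getD j 0)) := by
  cases rows with
  | nil => exact absurd rfl hne
  | cons r0 rest =>
    have h0 : r0.length = n := hlen r0 (by simp)
    simp only [pvZipStar]
    rw [h0, pv_foldl_min_const rest n (fun x hx => hlen x (by simp [hx]))]

theorem partition_grad_workers_spec : Claim_equal_partition_grad_workers := by
  intro ws g _ hpre
  obtain ⟨hws, hg0, hmod⟩ := hpre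
  simp only [Spec_partition_grad_workers, partition_grad_workers, partition_grad_workers_alt]
  set p := PySem.Int.floordiv ws g with hp
  have hpg : p * g = ws := by
    have h2 := PySem.Int.floordiv_mul_add_mod ws g
    rw [hmod] at h2; rw [hp]; omega
  rcases lt_or_gt_of_ne hg0 with hgneg | hgpos
  · -- grad_workers < 0: both sides are empty
    have hpneg : p ≤ 0 := by nlinarith
    simp [PySem.List.pyRange_one_eq_nil hpneg,
          PySem.List.pyRange_one_eq_nil (le_of_lt hgneg), pvZipStar,
          PySem.Set.ofList]
  · -- grad_workers > 0
    have hppos : 0 < p := by nlinarith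
    have hlen : ∀ r ∈ (PySem.List.pyRange 0 g 1).map
        (fun r => PySem.List.pyRange (r * p) (r * p + p) 1), r.length = p.toNat := by
      intro r hr
      simp only [List.mem_map] at hr
      obtain ⟨x, _, rfl⟩ := hr
      rw [PySem.List.length_pyRange_one]; omega
    have hne : (PySem.List.pyRange 0 g 1).map
        (fun r => PySem.List.pyRange (r * p) (r * p + p) 1) ≠ [] := by
      rw [PySem.List.pyRange_one_cons hgpos]; simp
    rw [pvZipStar_const_len _ _ hne hlen]
    rw [List.map_map]
    rw [PySem.List.pyRange_one 0 p, List.map_map, sub_zero]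
    congr 1
    apply List.map_congr_left
    intro j hj
    simp only [List.mem_range] at hj
    simp only [Function.comp]
    congr 1
    -- pyRange (0+j) ws p = column j of the transposed grid
    have hjp : (0 : Int) + (j : Int) < p := by omega
    have hjnn : (0 : Int) ≤ (0 : Int) + (j : Int) := by positivity
    have hjws : (0 : Int) + (j : Int) < ws := by nlinarith
    rw [PySem.List.pyRange_of_pos _ _ hppos, if_pos hjws]
    have hcount : ((ws - ((0:Int) + j) + p - 1) / p).toNat = g.toNat := by
      have : ws - ((0:Int) + j) + p - 1 = (p - 1 - j) + p * g := by omega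
      rw [this, Int.add_mul_ediv_left _ _ (ne_of_gt hppos),
          Int.ediv_eq_zero_of_lt (by omega) (by omega)]
      omega
    rw [hcount, List.map_map, PySem.List.pyRange_one 0 g, List.map_map, sub_zero]
    apply List.map_congr_left
    intro k hk
    simp only [List.mem_range] at hk
    simp only [Function.comp]
    have hkg : (0 : Int) + (k : Int) < g := by omega
    have hrow : ∀ (r : Int), 0 ≤ r →
        (PySem.List.pyRange (r * p) (r * p + p) 1).getD j 0 = r * p + (j : Int) := by
      intro r _
      have hjlt : j < (PySem.List.pyRange (r * p) (r * p + p) 1).length := by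
        rw [PySem.List.length_pyRange_one]; omega
      rw [List.getD_eq_getElem _ _ hjlt, PySem.List.getElem_pyRange_one]
    rw [hrow _ (by positivity)]
    ring

-- ===== VERDICT (by name: the statement is the Claim_ definition above) =====
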